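-- pv_equiv track=rewrite | github.com/JinSon12/AlgorithmsPractice | 백준/실버1/AUG_11_2447_별찍기.py | recurse
-- ===== SOURCE A (Python) =====
-- def concatenate(v1, v2):
--     return ["".join(x) for x in zip(v1, v2, v1)]
--
-- def recurse(n):
--     if n == 1:
--         return ["*"]
--
--     n //= 3
--
--     valSoFar = recurse(n)
--
--     top_bottom = concatenate(valSoFar, valSoFar)
--     middle = concatenate(valSoFar, [" " * n] * n)
--
--     return top_bottom + middle + top_bottom
-- ===== SOURCE B (Python) =====
-- def recurse(n):
--     ws = []
--     m = n
--     while m > 1: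
--         m //= 3
--         ws.append(m)
--     k = len(ws)
--     rows = []
--     for i in range(3 ** k):
--         s = ["*"]
--         for t in range(k, 0, -1):
--             q = (i // 3 ** (k - t)) % 3
--             if q == 1:
--                 s = s + [" "] * ws[t - 1] + s
--             else:
--                 s = s + s + s
--         rows.append("".join(s))
--     return rows
-- ===== Notes on version B (the rewrite author's own statement) =====
-- stated objective: alternative
-- what changed: Replaces the recursive concatenation of intermediate half-size grids by an iterative per-row construction: the chain of successive floor-quotients is computed once, and each output row is built independently by folding over the base-three digits of its row index; no recursion and no zip-based grid assembly.
import Mathlib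
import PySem

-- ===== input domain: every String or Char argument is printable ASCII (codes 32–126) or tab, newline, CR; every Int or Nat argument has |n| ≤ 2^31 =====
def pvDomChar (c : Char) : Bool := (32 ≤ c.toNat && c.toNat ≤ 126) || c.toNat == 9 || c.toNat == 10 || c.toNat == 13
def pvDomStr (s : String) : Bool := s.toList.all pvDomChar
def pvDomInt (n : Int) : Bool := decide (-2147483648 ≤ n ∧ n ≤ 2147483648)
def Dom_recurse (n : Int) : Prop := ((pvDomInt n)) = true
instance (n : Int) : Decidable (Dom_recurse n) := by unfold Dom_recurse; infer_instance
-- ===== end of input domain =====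

-- B replaces A's recursive concatenation of intermediate grids by an iterative per-row
-- construction driven by the base-3 digits of the row index (spacer widths precomputed by
-- one division chain); same rows wherever A returns at all.

-- ===== PORT A =====
def concatenate (v1 v2 : List String) : List String :=
  (v1.zip (v2.zip v1)).map (fun x => PySem.Str.join "" [x.1, x.2.1, x.2.2])

-- fuel is a totality guard only: n.toNat + 1 steps always suffice on the inputs Pre_ admits
def recurseF : Nat → Int → List String
  | 0, _ => []
  | f+1, n =>
    if n = 1 then ["*"]
    else
      let n' := PySem.Int.floordiv n 3
      let valSoFar := recurseF f n'
      let top_bottom := concatenate valSoFar valSoFar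
      let middle := concatenate valSoFar
        (PySem.List.pyRepeat [String.ofList (PySem.List.pyRepeat [' '] n')] n')
      top_bottom ++ middle ++ top_bottom

def recurse (n : Int) : List String := recurseF (n.toNat + 1) n

-- ===== PORT B =====
-- the 'while m > 1: m //= 3; ws.append(m)' loop (fuel is a totality guard: m.toNat + 1
-- iterations always suffice, since m strictly decreases while m > 1)
def chainF : Nat → Int → List Int
  | 0, _ => []
  | f+1, m =>
    if m > 1 then
      let m' := PySem.Int.floordiv m 3
      m' :: chainF f m'
    else []

-- 3 ** (k - t) is ported as (3:Int)^((k - t).toNat): exact, since 0 ≤ k - t inside the loop;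
-- ws[t - 1] is ported with pyGetD (the index is in range inside the loop)
def recurse_alt (n : Int) : List String :=
  let ws := chainF (n.toNat + 1) n
  let k := ws.length
  (PySem.List.pyRange 0 ((3:Int)^k) 1).foldl (fun rows i =>
    rows ++ [PySem.Str.join ""
      ((PySem.List.pyRange (k:Int) 0 (-1)).foldl (fun s t =>
        if PySem.Int.mod (PySem.Int.floordiv i ((3:Int)^(((k:Int) - t).toNat))) 3 = 1 then
          s ++ PySem.List.pyRepeat [" "] (PySem.List.pyGetD ws (t-1) 0) ++ s
        else s ++ s ++ s) ["*"])]) []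

-- ===== PRECONDITION & SPEC =====
-- A returns exactly when the iterated floor division of n by 3 reaches 1, i.e. on
-- n ∈ [3^k, 2*3^k) for some k; on every other int A recurses forever and raises
-- RecursionError.  The 'k ∈ List.range (Nat.log 3 n.toNat + 1)' bound is lossless
-- (3^k ≤ n forces k ≤ log₃ n); it only makes the condition decidable and quick to
-- evaluate, it excludes no input A returns on.
def Pre_recurse (n : Int) : Prop :=
  ∃ k ∈ List.range (Nat.log 3 n.toNat + 1), (3:Int)^k ≤ n ∧ n < 2*(3:Int)^k
instance (n : Int) : Decidable (Pre_recurse n) := by unfold Pre_recurse; infer_instance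
def pvWitness_recurse : Int := (3)

def Spec_recurse (n : Int) (out : List String) : Prop := out = recurse_alt n
instance (n : Int) (out : List String) : Decidable (Spec_recurse n out) := by unfold Spec_recurse; infer_instance

-- ===== CLAIM (what is proved, stated in full; the proofs are below) =====
def Claim_equal_recurse : Prop := ∀ (n : Int), Dom_recurse n → Pre_recurse n → Spec_recurse n (recurse n)

-- ===== LEMMAS AND PROOFS =====

-- proof-side description of one output row: rowSpec k n i is row i of A's output for an
-- input n whose division chain has length k, built by recursion on the TOP base-3 digit of i
def rowSpec : Nat → Nat → Nat → List Char
  | 0, _, _ => ['*']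
  | k+1, n, i =>
    let r := rowSpec k (n/3) (i % 3^k)
    if i / 3^k = 1 then r ++ List.replicate (n/3) ' ' ++ r else r ++ r ++ r

def gridSpec (k n : Nat) : List String :=
  (List.range (3^k)).map (fun i => String.ofList (rowSpec k n i))

theorem length_gridSpec (k n : Nat) : (gridSpec k n).length = 3^k := by simp [gridSpec]

-- a snoc-accumulating foldl is a map
theorem foldl_snoc {α β : Type} (f : α → β) (l : List α) (init : List β) :
    l.foldl (fun acc x => acc ++ [f x]) init = init ++ l.map f := by
  induction l generalizing init with
  | nil => simp
  | cons x xs ih => simp [ih]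

theorem join_empty_singletons (cs : List Char) :
    PySem.Str.join "" (cs.map (fun c => String.ofList [c])) = String.ofList cs := by
  rw [← String.toList_inj, PySem.Str.toList_join]
  simp only [List.map_map]
  have he : (cs.map (String.toList ∘ fun c => String.ofList [c])) = cs.map (fun c => [c]) := by
    simp [Function.comp_def]
  rw [he]
  simpa using PySem.Chars.join_nil_singletons cs

theorem join3 (x y z : String) :
    PySem.Str.join "" [x, y, z] = String.ofList (x.toList ++ y.toList ++ z.toList) := by
  rw [← String.toList_inj, PySem.Str.toList_join]
  rw [show (List.map String.toList [x,y,z]) = [x.toList, y.toList, z.toList] by simp]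
  rw [PySem.Chars.join_cons_cons, PySem.Chars.join_cons_cons, PySem.Chars.join_singleton]
  simp

theorem pyRange_zero_natCast' (N : Nat) :
    PySem.List.pyRange 0 (↑N) 1 = (List.range N).map Int.ofNat := by
  rw [PySem.List.pyRange_one]
  simp only [sub_zero, Int.toNat_natCast]
  exact List.map_congr_left (fun k _ => by simp)

-- splitting a map over range (m+m+m) into three blocks
theorem split3map {α : Type} (m : Nat) (F : Nat → α) :
    (List.range (m+m+m)).map F =
      (List.range m).map F ++ (List.range m).map (F ∘ (fun x => m + x))
        ++ (List.range m).map (F ∘ (fun x => m + m + x)) := by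
  rw [List.range_add, List.range_add, List.map_append, List.map_append, List.map_map, List.map_map]

theorem concat_self (v : List String) :
    concatenate v v = v.map (fun x => PySem.Str.join "" [x, x, x]) := by
  unfold concatenate
  induction v with
  | nil => simp
  | cons x xs ih => simpa using ih

theorem concat_rep (v : List String) (c : String) : ∀ M, v.length ≤ M →
    concatenate v (List.replicate M c) = v.map (fun x => PySem.Str.join "" [x, c, x]) := by
  unfold concatenate
  induction v with
  | nil => intro M h; simp
  | cons x xs ih =>
    intro M h
    have h' : xs.length + 1 ≤ M := by simpa using h
    obtain ⟨M', rfl⟩ : ∃ M', M = M'+1 := ⟨M-1, by omega⟩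
    simp only [List.replicate_succ, List.zip_cons_cons, List.map_cons]
    rw [ih M' (by omega)]

-- index arithmetic for the three row/column blocks (m := 3^k)
theorem idx_lo {m r : Nat} (hm : 0 < m) (hr : r < m) : r / m = 0 ∧ r % m = r :=
  ⟨Nat.div_eq_of_lt hr, Nat.mod_eq_of_lt hr⟩

theorem idx_mid {m r : Nat} (hm : 0 < m) (hr : r < m) : (m + r) / m = 1 ∧ (m + r) % m = r := by
  constructor
  · rw [add_comm, Nat.add_div_right _ hm, Nat.div_eq_of_lt hr]
  · rw [Nat.add_mod_left, Nat.mod_eq_of_lt hr]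

theorem idx_hi {m r : Nat} (hm : 0 < m) (hr : r < m) :
    (m + m + r) / m = 2 ∧ (m + m + r) % m = r := by
  constructor
  · rw [show m + m + r = r + m + m by ring, Nat.add_div_right _ hm, Nat.add_div_right _ hm,
        Nat.div_eq_of_lt hr]
  · rw [add_assoc, Nat.add_mod_left, Nat.add_mod_left, Nat.mod_eq_of_lt hr]

-- rowSpec at the three blocks of a size-3^(k+1) grid
theorem rowSpec_lo (k n r : Nat) (hr : r < 3^k) :
    rowSpec (k+1) n r = rowSpec k (n/3) r ++ rowSpec k (n/3) r ++ rowSpec k (n/3) r := by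
  have hm : 0 < (3:ℕ)^k := pow_pos (by norm_num) k
  obtain ⟨h1, h2⟩ := idx_lo hm hr
  rw [rowSpec]
  simp only [h1, h2]
  norm_num

theorem rowSpec_mid (k n r : Nat) (hr : r < 3^k) :
    rowSpec (k+1) n (3^k + r)
      = rowSpec k (n/3) r ++ List.replicate (n/3) ' ' ++ rowSpec k (n/3) r := by
  have hm : 0 < (3:ℕ)^k := pow_pos (by norm_num) k
  obtain ⟨h1, h2⟩ := idx_mid hm hr
  rw [rowSpec]
  simp only [h1, h2]
  norm_num

theorem rowSpec_hi (k n r : Nat) (hr : r < 3^k) :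
    rowSpec (k+1) n (3^k + 3^k + r)
      = rowSpec k (n/3) r ++ rowSpec k (n/3) r ++ rowSpec k (n/3) r := by
  have hm : 0 < (3:ℕ)^k := pow_pos (by norm_num) k
  obtain ⟨h1, h2⟩ := idx_hi hm hr
  rw [rowSpec]
  simp only [h1, h2]
  norm_num

-- the size-3^(k+1) grid from the size-3^k grid of the quotient
theorem gridSpec_succ (k n : Nat) :
    gridSpec (k+1) n =
      (gridSpec k (n/3)).map (fun x => PySem.Str.join "" [x, x, x])
      ++ (gridSpec k (n/3)).map (fun x =>
            PySem.Str.join "" [x, String.ofList (List.replicate (n/3) ' '), x])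
      ++ (gridSpec k (n/3)).map (fun x => PySem.Str.join "" [x, x, x]) := by
  have hM : (3:ℕ)^(k+1) = 3^k+3^k+3^k := by rw [pow_succ]; ring
  unfold gridSpec
  rw [hM]
  rw [split3map (3^k) (fun i => String.ofList (rowSpec (k+1) n i))]
  simp only [List.map_map]
  congr 1
  · congr 1
    · apply List.map_congr_left
      intro r hr
      simp only [Function.comp_def]
      rw [rowSpec_lo k n r (List.mem_range.mp hr), join3]
      simp only [String.toList_ofList]
    · apply List.map_congr_left
      intro r hr
      simp only [Function.comp_def]
      rw [rowSpec_mid k n r (List.mem_range.mp hr), join3]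
      simp only [String.toList_ofList]
  · apply List.map_congr_left
    intro r hr
    simp only [Function.comp_def]
    rw [rowSpec_hi k n r (List.mem_range.mp hr), join3]
    simp only [String.toList_ofList]

-- ===== A-side: recurseF computes gridSpec =====
theorem recurseF_eq (k : Nat) : ∀ f n : Nat, k < f → 3^k ≤ n → n < 2*3^k →
    recurseF f (↑n) = gridSpec k n := by
  induction k with
  | zero =>
    intro f n hf h1 h2
    norm_num at h1 h2
    have hn : n = 1 := by omega
    obtain ⟨f', rfl⟩ : ∃ f', f = f'+1 := ⟨f-1, by omega⟩
    subst hn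
    rw [recurseF]
    norm_num
    unfold gridSpec
    simp [List.range_succ, rowSpec]
  | succ k ih =>
    intro f n hf h1 h2
    obtain ⟨f', rfl⟩ : ∃ f', f = f'+1 := ⟨f-1, by omega⟩
    have hm : 0 < (3:ℕ)^k := pow_pos (by norm_num) k
    have hps : (3:ℕ)^(k+1) = 3^k*3 := pow_succ 3 k
    have hn3 : 3 ≤ n := le_trans (by omega) h1
    have hne : (↑n : Int) ≠ 1 := by
      have : n ≠ 1 := by omega
      exact_mod_cast this
    have hdiv : PySem.Int.floordiv (↑n) 3 = ((n/3 : Nat) : Int) := by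
      rw [show ((3:Int)) = ((3:Nat):Int) by norm_num, PySem.Int.floordiv_natCast]
    have hb1 : 3^k ≤ n/3 := by rw [hps] at h1; omega
    have hb2 : n/3 < 2*3^k := by rw [hps] at h2; omega
    rw [recurseF, if_neg hne]
    simp only [hdiv]
    rw [ih f' (n/3) (by omega) hb1 hb2]
    rw [PySem.List.pyRepeat_singleton, PySem.List.pyRepeat_singleton, Int.toNat_natCast]
    rw [concat_self]
    rw [concat_rep (gridSpec k (n/3)) _ (n/3) (by rw [length_gridSpec]; exact hb1)]
    rw [gridSpec_succ k n]

-- ===== B-side =====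
-- the division chain: chainF returns [n//3, n//9, …, 1]
theorem chainF_eq (k : Nat) : ∀ f n : Nat, k < f → 3^k ≤ n → n < 2*3^k →
    chainF f (↑n) = (List.range k).map (fun t => ((n / 3^(t+1) : Nat) : Int)) := by
  induction k with
  | zero =>
    intro f n hf h1 h2
    norm_num at h1 h2
    have hn : n = 1 := by omega
    obtain ⟨f', rfl⟩ : ∃ f', f = f'+1 := ⟨f-1, by omega⟩
    subst hn
    rw [chainF]
    norm_num
  | succ k ih =>
    intro f n hf h1 h2
    obtain ⟨f', rfl⟩ : ∃ f', f = f'+1 := ⟨f-1, by omega⟩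
    have hps : (3:ℕ)^(k+1) = 3^k*3 := pow_succ 3 k
    have hm : 0 < (3:ℕ)^k := pow_pos (by norm_num) k
    have hn3 : 3 ≤ n := le_trans (by omega) h1
    have hgt : ((↑n:Int)) > 1 := by exact_mod_cast (by omega : 1 < n)
    have hdiv : PySem.Int.floordiv (↑n) 3 = ((n/3 : Nat) : Int) := by
      rw [show ((3:Int)) = ((3:Nat):Int) by norm_num, PySem.Int.floordiv_natCast]
    have hb1 : 3^k ≤ n/3 := by rw [hps] at h1; omega
    have hb2 : n/3 < 2*3^k := by rw [hps] at h2; omega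
    rw [chainF, if_pos hgt]
    simp only [hdiv]
    rw [ih f' (n/3) (by omega) hb1 hb2]
    rw [List.range_succ_eq_map, List.map_cons, List.map_map]
    refine congrArg₂ List.cons (by norm_num) ?_
    apply List.map_congr_left
    intro t _
    simp only [Function.comp_def, Nat.succ_eq_add_one]
    congr 1
    rw [Nat.div_div_eq_div_mul, ← pow_succ']

-- a digit of i below position k is a digit of i % 3^k
theorem digit_mod (i k j : Nat) (hj : j < k) : ((i % 3^k) / 3^j) % 3 = (i / 3^j) % 3 := by
  conv_rhs => rw [← Nat.div_add_mod i (3^k)]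
  have h1 : (3:ℕ)^k = 3^(k-j)*3^j := by rw [← pow_add]; congr 1; omega
  have h2 : 3^k * (i / 3^k) + i % 3^k = i % 3^k + (3^(k-j) * (i / 3^k)) * 3^j := by
    rw [h1]; ring
  rw [h2, Nat.add_mul_div_right _ _ (pow_pos (by norm_num) j)]
  have h3 : 3^(k-j) * (i / 3^k) = (3^(k-j-1) * (i / 3^k)) * 3 := by
    rw [show (3:ℕ)^(k-j) = 3^(k-j-1)*3 by rw [← pow_succ]; congr 1; omega]; ring
  rw [h3, Nat.add_mul_mod_self_right]

-- B's inner loop over the digit positions, in Nat form: position j contributes width n/3^(k-j)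
def natFold (k n i : Nat) : List String :=
  (List.range k).foldl (fun s j =>
    if (i / 3^j) % 3 = 1 then s ++ List.replicate (n / 3^(k-j)) " " ++ s else s ++ s ++ s) ["*"]

-- the Int-level inner fold of the port equals natFold
theorem innerfold_nat (k n i : Nat) :
    (PySem.List.pyRange (↑k) 0 (-1)).foldl (fun s t =>
        if PySem.Int.mod (PySem.Int.floordiv (Int.ofNat i) ((3:Int)^(((↑k:Int) - t).toNat))) 3 = 1
        then s ++ PySem.List.pyRepeat [" "]
            (PySem.List.pyGetD ((List.range k).map (fun u => ((n / 3^(u+1) : Nat) : Int))) (t-1) 0)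
            ++ s
        else s ++ s ++ s) ["*"]
    = natFold k n i := by
  rw [PySem.List.pyRange_neg_one]
  simp only [sub_zero, Int.toNat_natCast]
  rw [List.foldl_map]
  unfold natFold
  apply PySem.List.foldl_congr_mem
  intro acc j hj
  have hjk : j < k := List.mem_range.mp hj
  have hexp : ((↑k:Int) - ((↑k:Int) - ↑j)).toNat = j := by omega
  have hidx0 : ((↑k:Int) - ↑j) - 1 = ((k - j - 1 : Nat) : Int) := by omega
  rw [hexp, hidx0]
  have hdiv : PySem.Int.floordiv (Int.ofNat i) ((3:Int)^j) = ((i / 3^j : Nat) : Int) := by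
    rw [show ((3:Int)^j) = ((3^j : Nat) : Int) by push_cast; ring,
        show (Int.ofNat i) = ((i:Nat):Int) from rfl, PySem.Int.floordiv_natCast]
  have hmod : PySem.Int.mod ((i / 3^j : Nat) : Int) 3 = ((i / 3^j % 3 : Nat) : Int) := by
    rw [show ((3:Int)) = ((3:Nat):Int) by norm_num, PySem.Int.mod_natCast]
  have hget : PySem.List.pyGetD
      ((List.range k).map (fun u => ((n / 3^(u+1) : Nat) : Int))) (((k - j - 1 : Nat) : Int)) 0
      = ((n / 3^(k-j) : Nat) : Int) := by
    rw [PySem.List.pyGetD_of_nonneg _ _ (by omega), Int.toNat_natCast]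
    rw [List.getD_eq_getElem?_getD, List.getElem?_map, List.getElem?_range (by omega)]
    simp only [Option.map_some, Option.getD_some]
    rw [show k - j - 1 + 1 = k - j by omega]
  rw [hdiv, hmod, hget]
  by_cases hq : i / 3^j % 3 = 1
  · rw [if_pos (by exact_mod_cast hq), if_pos hq, PySem.List.pyRepeat_singleton,
        Int.toNat_natCast]
  · rw [if_neg (by exact_mod_cast hq), if_neg hq]

-- natFold computes rowSpec (each piece of the accumulator is one character)
theorem natFold_eq (k : Nat) : ∀ n i : Nat, i < 3^k →
    natFold k n i = (rowSpec k n i).map (fun c => String.ofList [c]) := by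
  induction k with
  | zero =>
    intro n i hi
    unfold natFold
    simp [rowSpec]
  | succ k ih =>
    intro n i hi
    have hm : 0 < (3:ℕ)^k := pow_pos (by norm_num) k
    unfold natFold
    rw [List.range_succ, List.foldl_append]
    have hpref : (List.range k).foldl (fun s j =>
        if (i / 3^j) % 3 = 1 then s ++ List.replicate (n / 3^(k+1-j)) " " ++ s else s ++ s ++ s)
        ["*"]
        = natFold k (n/3) (i % 3^k) := by
      unfold natFold
      apply PySem.List.foldl_congr_mem
      intro acc j hj
      have hjk : j < k := List.mem_range.mp hj
      rw [digit_mod i k j hjk]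
      rw [show n / 3 / 3^(k-j) = n / 3^(k+1-j) by
        rw [Nat.div_div_eq_div_mul, ← pow_succ']
        congr 2
        omega]
    rw [hpref, ih (n/3) (i % 3^k) (Nat.mod_lt _ hm)]
    simp only [List.foldl_cons, List.foldl_nil]
    rw [show k + 1 - k = 1 by omega, pow_one]
    have hi3 : i / 3^k < 3 := by
      rw [pow_succ] at hi
      exact Nat.div_lt_of_lt_mul hi
    have htop : i / 3^k % 3 = i / 3^k := Nat.mod_eq_of_lt hi3
    rw [htop]
    rw [rowSpec]
    by_cases hq : i / 3^k = 1
    · rw [if_pos hq, if_pos hq]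
      simp [List.map_replicate]
    · rw [if_neg hq, if_neg hq]
      simp

-- B computes gridSpec
theorem recurse_alt_eq (k n : Nat) (hk : k < n + 1) (h1 : 3^k ≤ n) (h2 : n < 2*3^k) :
    recurse_alt (↑n) = gridSpec k n := by
  unfold recurse_alt
  have hch : chainF ((↑n:Int).toNat + 1) (↑n)
      = (List.range k).map (fun t => ((n / 3^(t+1) : Nat) : Int)) := by
    rw [Int.toNat_natCast]
    exact chainF_eq k (n+1) n hk h1 h2
  simp only [hch, List.length_map, List.length_range]
  rw [show ((3:Int)^k) = ((3^k : Nat) : Int) by push_cast; ring]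
  rw [pyRange_zero_natCast', foldl_snoc, List.nil_append, List.map_map]
  unfold gridSpec
  apply List.map_congr_left
  intro i hi
  have hik : i < 3^k := List.mem_range.mp hi
  simp only [Function.comp_def]
  rw [innerfold_nat k n i, natFold_eq k n i hik, join_empty_singletons]

-- ===== VERDICT (by name: the statement is the Claim_ definition above) =====
theorem recurse_spec : Claim_equal_recurse := by
  intro n _ hpre
  unfold Spec_recurse
  obtain ⟨k, -, hk1, hk2⟩ := hpre
  have hpos : (0:Int) < 3^k := by positivity
  have hN : n = ((n.toNat : Nat) : Int) := by omega
  set N := n.toNat with hNdef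
  have hb1 : 3^k ≤ N := by
    have : ((3^k : Nat) : Int) ≤ ((N : Nat) : Int) := by push_cast; omega
    exact_mod_cast this
  have hb2 : N < 2*3^k := by
    have : ((N : Nat) : Int) < ((2*3^k : Nat) : Int) := by push_cast; omega
    exact_mod_cast this
  have hkN : k < N + 1 := by
    have : k < 3^k := Nat.lt_pow_self (by norm_num)
    omega
  rw [hN]
  unfold recurse
  rw [Int.toNat_natCast]
  rw [recurseF_eq k (N+1) N hkN hb1 hb2]
  rw [recurse_alt_eq k N hkN hb1 hb2]
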